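-- pv_equiv track=rewrite | github.com/julianferres/Notebook-Python | String/applications.py | numOccurencesPrefix
-- ===== SOURCE A (Python) =====
-- def prefixFunction(s):
-- 	"""Devuelve un array pi, donde pi[i]
-- 	coincide con el mayor prefijo propio que ademas
-- 	es sufijo de s[0...i]"""
-- 	n = len(s)
-- 	pi = [0 for _ in range(n)]
--
-- 	for i in range(1,n):
-- 		j = pi[i-1]
-- 		while(j>0 and s[i]!=s[j]):
-- 			j = pi[j-1]
-- 		if(s[i]==s[j]): j+=1
-- 		pi[i] = j
--
-- 	return pi
--
-- def numOccurencesPrefix(s):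
-- 	"""Cuenta el numero de apariciones de
-- 	cada prefijo de s en s"""
-- 	pi = prefixFunction(s)
-- 	n = len(s)
-- 	ans = [0 for i in range(n+1)]
-- 	for i in range(n):
-- 		ans[pi[i]]+=1
-- 	i = n-1
-- 	while(i>0):
-- 		ans[pi[i-1]] += ans[i]
-- 		i-=1
-- 	for i in range(n+1):
-- 		ans[i]+=1
-- 	return ans
-- ===== SOURCE B (Python) =====
-- def numOccurencesPrefix(s):
-- 	"""Cuenta el numero de apariciones de
-- 	cada prefijo de s en s"""
-- 	n = len(s)
-- 	return [sum(1 for i in range(n + 1 - L) if s[i:i+L] == s[:L])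
-- 	        for L in range(n + 1)]
-- ===== Notes on version B (the rewrite author's own statement) =====
-- stated objective: simpler
-- what changed: Replaces the KMP failure-function construction plus bucket/back-propagation passes by a direct two-line count: for each prefix length L, count the start positions where that prefix occurs (the empty prefix naturally occurring at all n+1 positions, which is exactly A's ans[0]).
import Mathlib
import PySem

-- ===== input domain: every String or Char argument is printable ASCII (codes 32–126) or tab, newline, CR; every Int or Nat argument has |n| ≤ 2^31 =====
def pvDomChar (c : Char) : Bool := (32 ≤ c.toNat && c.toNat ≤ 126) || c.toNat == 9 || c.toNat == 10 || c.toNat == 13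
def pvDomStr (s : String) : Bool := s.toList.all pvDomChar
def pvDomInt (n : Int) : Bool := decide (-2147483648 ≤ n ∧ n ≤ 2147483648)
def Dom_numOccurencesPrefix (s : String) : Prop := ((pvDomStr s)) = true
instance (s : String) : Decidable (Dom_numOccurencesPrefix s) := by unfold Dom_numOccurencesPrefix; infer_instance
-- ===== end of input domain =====

-- B replaces A's KMP failure-function + bucket/back-propagation passes by a direct
-- count, for each prefix length L, of the start positions where that prefix occurs
-- (simpler, not faster). Indices/counts are kept as ℕ internally (Python's values
-- here are always nonnegative ints) and cast to Int on return.

-- ===== PORT A =====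
-- `while (j>0 and s[i] != s[j]): j = pi[j-1]`; the `j' < j` check only makes the
-- recursion total (it always holds, since pi[j-1] ≤ j-1 by construction).
def pfWhile (l : List Char) (pi : List Nat) (i : Nat) (j : Nat) : Nat :=
  if 0 < j ∧ ¬ (l.getD i ' ' = l.getD j ' ') then
    let j' := pi.getD (j - 1) 0
    if _h : j' < j then pfWhile l pi i j' else j'
  else j
termination_by j

def prefixFunction (l : List Char) : List Nat :=
  let n := l.length
  (List.range' 1 (n - 1)).foldl
    (fun pi i =>
      let j := pfWhile l pi i (pi.getD (i - 1) 0)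
      let j := if l.getD i ' ' = l.getD j ' ' then j + 1 else j
      pi.set i j)
    (List.replicate n 0)

def numOccurencesPrefix (s : String) : List Int :=
  let l := s.toList
  let pi := prefixFunction l
  let n := l.length
  let ans0 := List.replicate (n + 1) 0
  -- for i in range(n): ans[pi[i]] += 1
  let ans1 := (List.range n).foldl
    (fun a i => a.set (pi.getD i 0) (a.getD (pi.getD i 0) 0 + 1)) ans0
  -- i = n-1; while i > 0: ans[pi[i-1]] += ans[i]; i -= 1
  let ans2 := ((List.range' 1 (n - 1)).reverse).foldl
    (fun a i => a.set (pi.getD (i - 1) 0)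
      (a.getD (pi.getD (i - 1) 0) 0 + a.getD i 0)) ans1
  -- for i in range(n+1): ans[i] += 1
  let ans3 := (List.range (n + 1)).foldl
    (fun a i => a.set i (a.getD i 0 + 1)) ans2
  ans3.map Int.ofNat

-- ===== PORT B =====
-- Python slices s[i:i+L] and s[:L] have nonnegative bounds (clamped at the end),
-- so they are exactly (drop i).take L and take L on the character list.
def numOccurencesPrefix_alt (s : String) : List Int :=
  let l := s.toList
  let n := l.length
  (List.range (n + 1)).map (fun L =>
    Int.ofNat ((List.range (n + 1 - L)).countP
      (fun i => (l.drop i).take L == l.take L)))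

-- ===== PRECONDITION & SPEC =====
def Spec_numOccurencesPrefix (s : String) (out : List Int) : Prop := out = numOccurencesPrefix_alt s
instance (s : String) (out : List Int) : Decidable (Spec_numOccurencesPrefix s out) := by unfold Spec_numOccurencesPrefix; infer_instance

-- ===== CLAIM (what is proved, stated in full; the proofs are below) =====
def Claim_equal_numOccurencesPrefix : Prop := ∀ (s : String), Dom_numOccurencesPrefix s → Spec_numOccurencesPrefix s (numOccurencesPrefix s)

-- ===== LEMMAS AND PROOFS =====

-- `Bord l e j`: the prefix of length j of l is also a suffix of l.take e.
def Bord (l : List Char) (e j : Nat) : Prop :=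
  j ≤ e ∧ e ≤ l.length ∧ ∀ t, t < j → l.getD (e - j + t) ' ' = l.getD t ' '

lemma bord_self {l : List Char} {e : Nat} (he : e ≤ l.length) : Bord l e e := by
  refine ⟨le_refl _, he, fun t ht => ?_⟩
  congr 1; omega

lemma bord_zero {l : List Char} {e : Nat} (he : e ≤ l.length) : Bord l e 0 :=
  ⟨Nat.zero_le _, he, fun t ht => by omega⟩

-- borders compose: j border of take m, m border of take e ⇒ j border of take e
lemma bord_trans {l : List Char} {e m j : Nat}
    (h1 : Bord l m j) (h2 : Bord l e m) : Bord l e j := by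
  obtain ⟨hjm, hml, hj⟩ := h1
  obtain ⟨hme, hel, hm⟩ := h2
  refine ⟨le_trans hjm hme, hel, fun t ht => ?_⟩
  have h1t := hm (m - j + t) (by omega)
  have h2t := hj t ht
  have : e - m + (m - j + t) = e - j + t := by omega
  rw [this] at h1t
  exact h1t.trans h2t

-- two borders of the same prefix: the smaller is a border of the larger
lemma bord_anti {l : List Char} {e m j : Nat}
    (h1 : Bord l e j) (h2 : Bord l e m) (hjm : j ≤ m) : Bord l m j := by
  obtain ⟨hje, hel, hj⟩ := h1
  obtain ⟨hme, _, hm⟩ := h2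
  refine ⟨hjm, le_trans hme hel, fun t ht => ?_⟩
  have h2t := hm (m - j + t) (by omega)
  have h1t := hj t ht
  have : e - m + (m - j + t) = e - j + t := by omega
  rw [this] at h2t
  exact h2t.symm.trans h1t

-- extending a border by one matching character
lemma bord_succ {l : List Char} {i c : Nat} (hi : i < l.length) (hc : c ≤ i) :
    Bord l (i + 1) (c + 1) ↔ (Bord l i c ∧ l.getD i ' ' = l.getD c ' ') := by
  constructor
  · rintro ⟨h1, h2, h3⟩
    refine ⟨⟨hc, by omega, fun t ht => ?_⟩, ?_⟩
    · have := h3 t (by omega)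
      have heq : i + 1 - (c + 1) + t = i - c + t := by omega
      rw [heq] at this; exact this
    · have := h3 c (by omega)
      have heq : i + 1 - (c + 1) + c = i := by omega
      rw [heq] at this; exact this
  · rintro ⟨⟨h1, h2, h3⟩, hch⟩
    refine ⟨by omega, by omega, fun t ht => ?_⟩
    rcases Nat.lt_or_ge t c with htc | htc
    · have := h3 t htc
      have heq : i + 1 - (c + 1) + t = i - c + t := by omega
      rw [heq]; exact this
    · have heq : i + 1 - (c + 1) + t = i := by omega
      rw [heq]
      have htc' : t = c := by omega
      rw [htc']; exact hch

-- correctness of the first m entries of a failure-function array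
def PiOk (l : List Char) (pi : List Nat) (m : Nat) : Prop :=
  ∀ i, i < m → pi.getD i 0 ≤ i ∧ Bord l (i + 1) (pi.getD i 0) ∧
    ∀ c, c ≤ i → Bord l (i + 1) c → c ≤ pi.getD i 0

lemma piOk_dec {l : List Char} {pi : List Nat} (h : PiOk l pi pi.length) :
    ∀ j, 0 < j → pi.getD (j - 1) 0 < j := by
  intro j hj
  rcases Nat.lt_or_ge (j - 1) pi.length with hlt | hge
  · have := (h (j - 1) hlt).1; omega
  · rw [List.getD_eq_default _ _ hge]; omega

-- the while loop: from a border j of l.take i bounding all extendable borders,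
-- it finds the largest extendable one (or 0)
lemma pfWhile_spec {l : List Char} {pi : List Nat} {i : Nat}
    (hi : i < l.length) (hpi : PiOk l pi i) :
    ∀ j, j < i → Bord l i j →
      (∀ c, c + 1 ≤ i → Bord l (i + 1) (c + 1) → c ≤ j) →
      (pfWhile l pi i j < i ∧ Bord l i (pfWhile l pi i j) ∧
       (∀ c, c + 1 ≤ i → Bord l (i + 1) (c + 1) → c ≤ pfWhile l pi i j) ∧
       (pfWhile l pi i j = 0 ∨ l.getD i ' ' = l.getD (pfWhile l pi i j) ' ')) := by
  intro j
  induction j using Nat.strong_induction_on with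
  | _ j ih =>
    intro hji hbj hub
    rw [pfWhile]
    by_cases hcond : 0 < j ∧ ¬ (l.getD i ' ' = l.getD j ' ')
    · rw [if_pos hcond]
      have hj1 : j - 1 < i := by omega
      have hple := (hpi (j - 1) hj1).1
      have hlt : pi.getD (j - 1) 0 < j := by omega
      simp only [dif_pos hlt]
      have hbp : Bord l j (pi.getD (j - 1) 0) := by
        have := (hpi (j - 1) hj1).2.1
        have heq : j - 1 + 1 = j := by omega
        rwa [heq] at this
      have hbj' : Bord l i (pi.getD (j - 1) 0) := bord_trans hbp hbj
      have hub' : ∀ c, c + 1 ≤ i → Bord l (i + 1) (c + 1) → c ≤ pi.getD (j - 1) 0 := by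
        intro c hc hbc
        have hcj : c ≤ j := hub c hc hbc
        have hbc' := (bord_succ hi (by omega)).mp hbc
        have hcne : c ≠ j := by
          intro h; subst h; exact hcond.2 hbc'.2
        have hbjc : Bord l j c := bord_anti hbc'.1 hbj (by omega)
        have hmax := (hpi (j - 1) hj1).2.2
        have heq : j - 1 + 1 = j := by omega
        rw [heq] at hmax
        exact hmax c (by omega) hbjc
      exact ih _ hlt (by omega) hbj' hub'
    · rw [if_neg hcond]
      refine ⟨hji, hbj, hub, ?_⟩
      by_cases h0 : j = 0
      · left; exact h0
      · right
        exact Decidable.byContradiction fun hne => hcond ⟨by omega, hne⟩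

-- getD after set
lemma getD_set' (a : List Nat) (m q v : Nat) :
    (a.set m v).getD q 0 = if q = m ∧ m < a.length then v else a.getD q 0 := by
  simp [List.getD_eq_getElem?_getD, List.getElem?_set]
  split_ifs with h1 h2 h3 <;> simp_all

lemma getD_replicate' (n i : Nat) : (List.replicate n (0:Nat)).getD i 0 = 0 := by
  simp [List.getD_eq_getElem?_getD, List.getElem?_replicate]
  split_ifs <;> simp

lemma prefixFunction_aux (l : List Char) : ∀ k, k ≤ l.length - 1 →
    ((List.range' 1 k).foldl
      (fun pi i =>
        let j := pfWhile l pi i (pi.getD (i - 1) 0)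
        let j := if l.getD i ' ' = l.getD j ' ' then j + 1 else j
        pi.set i j)
      (List.replicate l.length 0)).length = l.length ∧
    PiOk l ((List.range' 1 k).foldl
      (fun pi i =>
        let j := pfWhile l pi i (pi.getD (i - 1) 0)
        let j := if l.getD i ' ' = l.getD j ' ' then j + 1 else j
        pi.set i j)
      (List.replicate l.length 0)) (min (k + 1) l.length) := by
  intro k
  induction k with
  | zero =>
    intro _
    refine ⟨by simp, ?_⟩
    intro i hi
    have hi0 : i = 0 := by omega
    have hn : 0 < l.length := by omega
    subst hi0
    simp only [List.range'_zero, List.foldl_nil]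
    rw [getD_replicate']
    exact ⟨le_refl _, bord_zero (by omega), fun c hc _ => by omega⟩
  | succ k ih =>
    intro hk1
    obtain ⟨ihlen, ihok⟩ := ih (by omega)
    rw [List.range'_concat, List.foldl_append, List.foldl_cons, List.foldl_nil]
    set old := (List.range' 1 k).foldl
      (fun pi i =>
        let j := pfWhile l pi i (pi.getD (i - 1) 0)
        let j := if l.getD i ' ' = l.getD j ' ' then j + 1 else j
        pi.set i j)
      (List.replicate l.length 0) with hold
    have hidx : 1 + 1 * k = k + 1 := by omega
    rw [hidx]
    have hkn : k + 1 < l.length := by omega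
    have hmin : min (k + 1) l.length = k + 1 := by omega
    rw [hmin] at ihok
    -- the value written at position k+1
    have hple := (ihok k (by omega)).1
    have hbj0 : Bord l (k + 1) (old.getD k 0) := by
      have := (ihok k (by omega)).2.1
      simpa using this
    have hmaxk := (ihok k (by omega)).2.2
    have hub0 : ∀ c, c + 1 ≤ k + 1 → Bord l (k + 1 + 1) (c + 1) → c ≤ old.getD ((k+1) - 1) 0 := by
      intro c hc hbc
      have hbc' := (bord_succ hkn (by omega)).mp hbc
      simpa using hmaxk c (by omega) hbc'.1
    have hspec := pfWhile_spec (pi := old) hkn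
      (by intro i' hi'; exact ihok i' (by omega))
      (old.getD ((k+1) - 1) 0) (by simp only [Nat.add_sub_cancel]; omega)
      (by simpa using hbj0) hub0
    obtain ⟨hrlt, hrbord, hrub, hrexit⟩ := hspec
    set r := pfWhile l old (k + 1) (old.getD ((k+1) - 1) 0) with hr
    simp only []
    constructor
    · rw [List.length_set]; exact ihlen
    · intro i' hi'
      by_cases hi'k : i' = k + 1
      · subst hi'k
        rw [getD_set']
        rw [if_pos ⟨rfl, by omega⟩]
        by_cases hch : l.getD (k + 1) ' ' = l.getD r ' '
        · rw [if_pos hch]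
          refine ⟨by omega, (bord_succ hkn (by omega)).mpr ⟨hrbord, hch⟩, ?_⟩
          intro c hc hbc
          cases c with
          | zero => omega
          | succ c' =>
            have := hrub c' (by omega) hbc
            omega
        · rw [if_neg hch]
          have hr0 : r = 0 := by
            rcases hrexit with h | h
            · exact h
            · exact absurd h hch
          refine ⟨by omega, ?_, ?_⟩
          · rw [hr0]; exact bord_zero (by omega)
          · intro c hc hbc
            cases c with
            | zero => omega
            | succ c' =>
              exfalso
              have hc' := hrub c' (by omega) hbc
              have hc0 : c' = 0 := by omega
              have := (bord_succ hkn (by omega)).mp hbc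
              apply hch
              rw [hr0, ← hc0]
              exact this.2
      · have hi'' : i' < k + 1 := by omega
        have hold' := ihok i' hi''
        rw [getD_set', if_neg (by intro h; exact hi'k h.1)]
        exact hold'

lemma prefixFunction_length (l : List Char) :
    (prefixFunction l).length = l.length := by
  have := (prefixFunction_aux l (l.length - 1) (le_refl _)).1
  exact this

lemma prefixFunction_ok (l : List Char) :
    PiOk l (prefixFunction l) l.length := by
  have h := (prefixFunction_aux l (l.length - 1) (le_refl _)).2
  have hmin : min (l.length - 1 + 1) l.length = l.length := by omega
  rw [hmin] at h
  exact h

-- chains of failure links, computed with fuel (fuel j suffices when links decrease)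
def chainF (pi : List Nat) : Nat → Nat → List Nat
  | 0, j => [j]
  | f + 1, j => if j = 0 then [0] else j :: chainF pi f (pi.getD (j - 1) 0)

def chain (pi : List Nat) (j : Nat) : List Nat := chainF pi j j

lemma chainF_congr {pi : List Nat} (hdec : ∀ j, 0 < j → pi.getD (j - 1) 0 < j) :
    ∀ f g j, j ≤ f → j ≤ g → chainF pi f j = chainF pi g j := by
  intro f
  induction f with
  | zero =>
    intro g j hf hg
    have : j = 0 := by omega
    subst this
    cases g with
    | zero => rfl
    | succ g => simp [chainF]
  | succ f ih =>
    intro g j hf hg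
    by_cases hj : j = 0
    · subst hj
      cases g with
      | zero => simp [chainF]
      | succ g => simp [chainF]
    · have hj0 : 0 < j := by omega
      cases g with
      | zero => omega
      | succ g =>
        have hlt := hdec j hj0
        simp only [chainF, if_neg hj]
        congr 1
        exact ih g (pi.getD (j-1) 0) (by omega) (by omega)

lemma chain_zero (pi : List Nat) : chain pi 0 = [0] := rfl

lemma chain_cons {pi : List Nat} (hdec : ∀ j, 0 < j → pi.getD (j - 1) 0 < j)
    {j : Nat} (hj : 0 < j) :
    chain pi j = j :: chain pi (pi.getD (j - 1) 0) := by
  obtain ⟨j', rfl⟩ : ∃ j', j = j' + 1 := ⟨j - 1, by omega⟩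
  have hlt := hdec (j' + 1) hj
  show chainF pi (j' + 1) (j' + 1) = _
  simp only [chainF, if_neg (by omega : ¬ j' + 1 = 0)]
  congr 1
  exact chainF_congr hdec j' _ _ (by omega) (le_refl _)

lemma chain_le {pi : List Nat} (hdec : ∀ j, 0 < j → pi.getD (j - 1) 0 < j) :
    ∀ j k, k ∈ chain pi j → k ≤ j := by
  intro j
  induction j using Nat.strong_induction_on with
  | _ j ih =>
    intro k hk
    by_cases hj : j = 0
    · subst hj; simp [chain, chainF] at hk; omega
    · rw [chain_cons hdec (by omega)] at hk
      rcases List.mem_cons.mp hk with h | h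
      · omega
      · have h1 := hdec j (by omega)
        have := ih _ h1 k h
        omega

-- every element of the chain of a border is a border
lemma chain_bord {l : List Char} {pi : List Nat}
    (hpi : PiOk l pi l.length) (hdec : ∀ j, 0 < j → pi.getD (j - 1) 0 < j)
    {e : Nat} (he : e ≤ l.length) :
    ∀ m, Bord l e m → ∀ k, k ∈ chain pi m → Bord l e k := by
  intro m
  induction m using Nat.strong_induction_on with
  | _ m ih =>
    intro hbm k hk
    by_cases hm : m = 0
    · subst hm
      simp [chain, chainF] at hk
      subst hk
      exact bord_zero he
    · rw [chain_cons hdec (by omega)] at hk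
      rcases List.mem_cons.mp hk with h | h
      · subst h; exact hbm
      · have hm1 : m - 1 < l.length := by
          have := hbm.1; omega
        have hb : Bord l m (pi.getD (m - 1) 0) := by
          have := (hpi (m - 1) hm1).2.1
          have heq : m - 1 + 1 = m := by omega
          rw [heq] at this
          exact this
        exact ih _ (hdec m (by omega)) (bord_trans hb hbm) k h

-- every border is in the chain
lemma bord_chain {l : List Char} {pi : List Nat}
    (hpi : PiOk l pi l.length) (hdec : ∀ j, 0 < j → pi.getD (j - 1) 0 < j) :
    ∀ m, m ≤ l.length → ∀ k, k ≤ m → Bord l m k → k ∈ chain pi m := by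
  intro m
  induction m using Nat.strong_induction_on with
  | _ m ih =>
    intro hm k hk hb
    by_cases hkm : k = m
    · subst hkm
      by_cases h0 : k = 0
      · subst h0; simp [chain, chainF]
      · rw [chain_cons hdec (by omega)]; exact List.mem_cons_self ..
    · have hm0 : 0 < m := by omega
      have hm1 : m - 1 < l.length := by omega
      have hmax := (hpi (m - 1) hm1).2.2
      have hbp := (hpi (m - 1) hm1).2.1
      have heq : m - 1 + 1 = m := by omega
      rw [heq] at hmax hbp
      have hkp : k ≤ pi.getD (m - 1) 0 := hmax k (by omega) hb
      have hbk : Bord l (pi.getD (m - 1) 0) k := bord_anti hb hbp hkp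
      rw [chain_cons hdec hm0]
      exact List.mem_cons_of_mem _
        (ih _ (hdec m hm0) (by have := (hpi (m-1) hm1).1; omega) k hkp hbk)

-- chain membership at pi[e-1] characterises the proper borders of l.take e
lemma chain_iff_bord {l : List Char} {pi : List Nat}
    (hpi : PiOk l pi l.length) (hdec : ∀ j, 0 < j → pi.getD (j - 1) 0 < j)
    {e : Nat} (he1 : 1 ≤ e) (he : e ≤ l.length) (k : Nat) :
    k ∈ chain pi (pi.getD (e - 1) 0) ↔ (k < e ∧ Bord l e k) := by
  have he1' : e - 1 < l.length := by omega
  have hbp := (hpi (e - 1) he1').2.1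
  have hple := (hpi (e - 1) he1').1
  have hmax := (hpi (e - 1) he1').2.2
  have heq : e - 1 + 1 = e := by omega
  rw [heq] at hbp hmax
  constructor
  · intro hk
    have hkle := chain_le hdec _ k hk
    exact ⟨by omega, chain_bord hpi hdec he _ hbp k hk⟩
  · rintro ⟨hke, hbk⟩
    have hkp : k ≤ pi.getD (e - 1) 0 := hmax k (by omega) hbk
    have hbk' : Bord l (pi.getD (e - 1) 0) k := bord_anti hbk hbp hkp
    exact bord_chain hpi hdec _ (by omega) k hkp hbk'


lemma foldl_set_length (step : List Nat → Nat → Nat) (g : Nat → Nat) (xs : List Nat) :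
    ∀ a : List Nat, (xs.foldl (fun a i => a.set (g i) (step a i)) a).length = a.length := by
  induction xs with
  | nil => intro a; rfl
  | cons x xs ih => intro a; simp [List.foldl_cons, ih, List.length_set]

-- bucket counting: repeated "a[g i] += 1"
lemma foldl_bucket (g : Nat → Nat) (xs : List Nat) :
    ∀ a : List Nat, (∀ x ∈ xs, g x < a.length) → ∀ k,
      ((xs.foldl (fun a i => a.set (g i) (a.getD (g i) 0 + 1)) a).getD k 0)
        = a.getD k 0 + (xs.countP (fun i => g i = k)) := by
  induction xs with
  | nil => intro a _ k; simp
  | cons x xs ih =>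
    intro a ha k
    have hx : g x < a.length := ha x (List.mem_cons_self ..)
    rw [List.foldl_cons, ih _ (by intro y hy; rw [List.length_set]; exact ha y (List.mem_cons_of_mem _ hy)) k]
    rw [getD_set']
    rw [List.countP_cons]
    by_cases hgx : g x = k
    · subst hgx
      simp [hx]
      omega
    · simp [hgx, Ne.symm hgx]

-- the backward propagation loop
lemma back_loop {l : List Char} {pi : List Nat}
    (_hlen : pi.length = l.length)
    (hdec : ∀ j, 0 < j → pi.getD (j - 1) 0 < j) :
    ∀ (m : Nat), m ≤ l.length → ∀ (a : List Nat), a.length = l.length + 1 → ∀ k,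
      (((List.range' 1 m).reverse).foldl
        (fun a i => a.set (pi.getD (i - 1) 0)
          (a.getD (pi.getD (i - 1) 0) 0 + a.getD i 0)) a).getD k 0
        = a.getD k 0 + ∑ j ∈ Finset.Icc 1 m,
            a.getD j 0 * (if k ∈ chain pi (pi.getD (j - 1) 0) then 1 else 0) := by
  intro m
  induction m with
  | zero => intro _ a _ k; simp
  | succ m ih =>
    intro hm a ha k
    rw [List.range'_concat, List.reverse_append, List.reverse_singleton]
    rw [List.singleton_append, List.foldl_cons]
    have hidx : 1 + 1 * m = m + 1 := by omega
    rw [hidx]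
    set p := pi.getD (m + 1 - 1) 0 with hp
    have hpm : p < m + 1 := hdec (m + 1) (by omega)
    set A := a.getD (m + 1) 0 with hA
    set a' := a.set p (a.getD p 0 + A) with ha'
    have ha'len : a'.length = l.length + 1 := by rw [ha', List.length_set]; exact ha
    have hplen : p < a.length := by omega
    have hgd : ∀ q, a'.getD q 0 = a.getD q 0 + (if q = p then A else 0) := by
      intro q
      rw [ha', getD_set']
      by_cases hq : q = p
      · rw [if_pos ⟨hq, hplen⟩, if_pos hq, hq]
      · rw [if_neg (fun h => hq h.1), if_neg hq, Nat.add_zero]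
    rw [ih (by omega) a' ha'len k]
    rw [Finset.sum_Icc_succ_top (by omega : 1 ≤ m + 1)]
    have hsum : ∑ j ∈ Finset.Icc 1 m,
        a'.getD j 0 * (if k ∈ chain pi (pi.getD (j - 1) 0) then 1 else 0)
      = (∑ j ∈ Finset.Icc 1 m,
          a.getD j 0 * (if k ∈ chain pi (pi.getD (j - 1) 0) then 1 else 0))
        + (if p ∈ Finset.Icc 1 m then A * (if k ∈ chain pi (pi.getD (p - 1) 0) then 1 else 0) else 0) := by
      rw [← Finset.sum_ite_eq' (Finset.Icc 1 m) p
        (fun j => A * (if k ∈ chain pi (pi.getD (j - 1) 0) then 1 else 0))]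
      rw [← Finset.sum_add_distrib]
      apply Finset.sum_congr rfl
      intro j _
      rw [hgd]
      by_cases hj : j = p
      · rw [if_pos hj, if_pos hj, hj, Nat.add_mul]
      · rw [if_neg hj, if_neg hj, Nat.add_zero, Nat.add_zero]
    rw [hsum, hgd k]
    have hchain : (if k ∈ chain pi p then (1:Nat) else 0)
        = (if k = p then 1 else 0) + (if 0 < p then (if k ∈ chain pi (pi.getD (p - 1) 0) then 1 else 0) else 0) := by
      by_cases hp0 : 0 < p
      · simp only [chain_cons hdec hp0, List.mem_cons, if_pos hp0]
        by_cases hkp : k = p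
        · rw [if_pos (Or.inl hkp), if_pos hkp]
          have hnm : k ∉ chain pi (pi.getD (p - 1) 0) := by
            intro hmem
            have h1 := chain_le hdec _ k hmem
            have h2 := hdec p hp0
            omega
          rw [if_neg hnm]
        · rw [if_neg hkp]
          by_cases hmem : k ∈ chain pi (pi.getD (p - 1) 0)
          · rw [if_pos (Or.inr hmem), if_pos hmem]
          · rw [if_neg (by tauto), if_neg hmem]
      · have hp0' : p = 0 := by omega
        rw [hp0', chain_zero]
        simp
    -- p ∈ Icc 1 m iff 0 < p (since p ≤ m)
    have hicc : (p ∈ Finset.Icc 1 m) ↔ 0 < p := by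
      rw [Finset.mem_Icc]; omega
    rw [hchain]
    by_cases hp0 : 0 < p
    · rw [if_pos (hicc.mpr hp0), if_pos hp0]
      by_cases hkp : k = p
      · rw [if_pos hkp, if_pos hkp]; ring
      · rw [if_neg hkp, if_neg hkp]; ring
    · rw [if_neg (fun h => hp0 (hicc.mp h)), if_neg hp0]
      by_cases hkp : k = p
      · rw [if_pos hkp, if_pos hkp]; ring
      · rw [if_neg hkp, if_neg hkp]; ring

-- Bool form of Bord, for use inside countP
def bordB (l : List Char) (e j : Nat) : Bool :=
  decide (j ≤ e) && decide (e ≤ l.length) &&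
    (List.range j).all (fun t => l.getD (e - j + t) ' ' == l.getD t ' ')

lemma bordB_iff (l : List Char) (e j : Nat) : bordB l e j = true ↔ Bord l e j := by
  simp [bordB, Bord, List.all_eq_true, List.mem_range, and_assoc]

-- countP of a disjoint disjunction
lemma countP_or_disjoint (xs : List Nat) (p q : Nat → Bool)
    (h : ∀ x ∈ xs, ¬(p x = true ∧ q x = true)) :
    xs.countP (fun x => p x || q x) = xs.countP p + xs.countP q := by
  induction xs with
  | nil => simp
  | cons x xs ih =>
    rw [List.countP_cons, List.countP_cons, List.countP_cons,
      ih (fun y hy => h y (List.mem_cons_of_mem _ hy))]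
    have hx := h x (List.mem_cons_self ..)
    cases hp : p x <;> cases hq : q x <;> simp_all <;> omega

lemma countP_eq_range (k : Nat) : ∀ m, (List.range m).countP (fun e => e == k)
    = if k < m then 1 else 0 := by
  intro m
  induction m with
  | zero => simp
  | succ m ih =>
    rw [List.range_succ, List.countP_append, ih, List.countP_cons]
    simp only [List.countP_nil, beq_iff_eq, Nat.zero_add]
    split_ifs <;> omega

-- shifting the counting index
lemma countP_shift (q : Nat → Bool) (a : Nat) : ∀ m,
    (List.range m).countP (fun i => q (i + a))
      = (List.range (a + m)).countP (fun e => decide (a ≤ e) && q e) := by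
  intro m
  induction m with
  | zero =>
    rw [List.countP_eq_zero.mpr, List.countP_eq_zero.mpr]
    · intro e he; simp at he ⊢; omega
    · intro e he; simp at he
  | succ m ih =>
    have : a + (m + 1) = (a + m) + 1 := by omega
    rw [this, List.range_succ, List.range_succ, List.countP_append,
      List.countP_append, ih]
    congr 1
    simp [Nat.add_comm a m]

lemma countP_range_eq_sum (q : Nat → Bool) : ∀ m,
    (List.range m).countP q = ∑ i ∈ Finset.range m, (if q i = true then 1 else 0) := by
  intro m
  induction m with
  | zero => simp
  | succ m ih =>
    rw [List.range_succ, List.countP_append, ih, Finset.sum_range_succ, List.countP_cons]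
    simp

lemma sum_map_range (f : Nat → Nat) : ∀ m,
    ((List.range m).map f).sum = ∑ i ∈ Finset.range m, f i := by
  intro m
  induction m with
  | zero => simp
  | succ m ih => rw [List.range_succ, List.map_append, List.sum_append, ih, Finset.sum_range_succ]; simp

-- summing a function of g over a list, grouped by the value of g (values ≥ 1)
lemma sum_fiber (g : Nat → Nat) (f : Nat → Nat) (M : Nat) (hf0 : f 0 = 0) :
    ∀ xs : List Nat, (∀ x ∈ xs, g x ≤ M) →
      ∑ j ∈ Finset.Icc 1 M, (xs.countP (fun i => g i = j)) * f j
        = (xs.map (fun i => f (g i))).sum := by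
  intro xs
  induction xs with
  | nil => simp
  | cons x xs ih =>
    intro hb
    rw [List.map_cons, List.sum_cons, ← ih (fun y hy => hb y (List.mem_cons_of_mem _ hy))]
    have step : ∀ j, ((x :: xs).countP (fun i => g i = j))
        = (xs.countP (fun i => g i = j)) + (if g x = j then 1 else 0) := by
      intro j
      rw [List.countP_cons]
      simp
    rw [Finset.sum_congr rfl (fun j _ => by rw [step j, Nat.add_mul])]
    rw [Finset.sum_add_distrib]
    have : ∑ j ∈ Finset.Icc 1 M, (if g x = j then 1 else 0) * f j
        = f (g x) := by
      have h1 : ∀ j, (if g x = j then 1 else 0) * f j = (if j = g x then f j else 0) := by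
        intro j
        by_cases h : g x = j
        · rw [if_pos h, if_pos h.symm, Nat.one_mul]
        · rw [if_neg h, if_neg (fun hh => h hh.symm), Nat.zero_mul]
      rw [Finset.sum_congr rfl (fun j _ => h1 j)]
      rw [Finset.sum_ite_eq' (Finset.Icc 1 M) (g x) f]
      by_cases hgx : g x ∈ Finset.Icc 1 M
      · rw [if_pos hgx]
      · rw [if_neg hgx]
        have := hb x (List.mem_cons_self ..)
        rw [Finset.mem_Icc] at hgx
        have : g x = 0 := by omega
        rw [this, hf0]
    omega

lemma getD_take' (xs : List Char) (kk t : Nat) (h : t < kk) :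
    (xs.take kk).getD t ' ' = xs.getD t ' ' := by
  simp [List.getD_eq_getElem?_getD, h]

lemma getD_drop' (xs : List Char) (i t : Nat) :
    (xs.drop i).getD t ' ' = xs.getD (i + t) ' ' := by
  simp [List.getD_eq_getElem?_getD, List.getElem?_drop]

-- a Python slice-comparison s[i:i+L] == s[:L] says exactly "L is a border of l.take (i+L)"
lemma slice_iff_bord (l : List Char) (k i : Nat) (h : i + k ≤ l.length) :
    (l.drop i).take k = l.take k ↔ Bord l (i + k) k := by
  have hlen1 : ((l.drop i).take k).length = k := by
    simp [List.length_take, List.length_drop]; omega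
  have hlen2 : (l.take k).length = k := by
    simp [List.length_take]; omega
  constructor
  · intro heq
    refine ⟨by omega, by omega, fun t ht => ?_⟩
    have h2 := congrArg (fun xs => List.getD xs t ' ') heq
    simp only at h2
    rw [getD_take' _ _ _ ht, getD_take' _ _ _ ht, getD_drop'] at h2
    have h3 : i + k - k + t = i + t := by omega
    rw [h3]
    exact h2
  · rintro ⟨_, _, hb⟩
    apply List.ext_getElem (by rw [hlen1, hlen2])
    intro t h1 h2
    rw [← List.getD_eq_getElem _ ' ' h1, ← List.getD_eq_getElem _ ' ' h2]
    have ht : t < k := by omega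
    rw [getD_take' _ _ _ ht, getD_take' _ _ _ ht, getD_drop']
    have := hb t ht
    have h3 : i + k - k + t = i + t := by omega
    rw [h3] at this
    exact this

-- the A-side accumulator evaluated at k equals B's count for prefix length k
lemma A_entry (l : List Char) (k : Nat) (hk : k ≤ l.length) :
    ((List.range (l.length + 1)).foldl (fun a i => a.set i (a.getD i 0 + 1))
      (((List.range' 1 (l.length - 1)).reverse).foldl
        (fun a i => a.set ((prefixFunction l).getD (i - 1) 0)
          (a.getD ((prefixFunction l).getD (i - 1) 0) 0 + a.getD i 0))
        ((List.range l.length).foldl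
          (fun a i => a.set ((prefixFunction l).getD i 0)
            (a.getD ((prefixFunction l).getD i 0) 0 + 1))
          (List.replicate (l.length + 1) 0)))).getD k 0
    = (List.range (l.length + 1 - k)).countP (fun i => (l.drop i).take k == l.take k) := by
  set n := l.length with hn
  set pi := prefixFunction l with hpidef
  have hlen : pi.length = n := prefixFunction_length l
  have hpi : PiOk l pi n := prefixFunction_ok l
  have hdec : ∀ j, 0 < j → pi.getD (j - 1) 0 < j := piOk_dec (by rw [hlen]; exact hpi)
  set a0 := List.replicate (n + 1) (0:Nat) with ha0
  set a1 := (List.range n).foldl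
    (fun a i => a.set (pi.getD i 0) (a.getD (pi.getD i 0) 0 + 1)) a0 with ha1
  set a2 := ((List.range' 1 (n - 1)).reverse).foldl
    (fun a i => a.set (pi.getD (i - 1) 0)
      (a.getD (pi.getD (i - 1) 0) 0 + a.getD i 0)) a1 with ha2
  have ha0len : a0.length = n + 1 := by simp [ha0]
  have ha1len : a1.length = n + 1 := by
    rw [ha1, foldl_set_length (fun a i => a.getD (pi.getD i 0) 0 + 1) (fun i => pi.getD i 0)]
    exact ha0len
  have hpile : ∀ i, i < n → pi.getD i 0 ≤ i := fun i hi => (hpi i hi).1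
  -- bucket pass
  have h1 : ∀ q, a1.getD q 0 = (List.range n).countP (fun i => pi.getD i 0 = q) := by
    intro q
    rw [ha1, foldl_bucket (fun i => pi.getD i 0) _ _
      (by intro x hx; show pi.getD x 0 < a0.length; rw [ha0len];
          have := hpile x (List.mem_range.mp hx); have := List.mem_range.mp hx; omega) q]
    rw [ha0, getD_replicate', Nat.zero_add]
  -- backward propagation pass
  have h2 : a2.getD k 0 = a1.getD k 0 + ∑ j ∈ Finset.Icc 1 (n - 1),
      a1.getD j 0 * (if k ∈ chain pi (pi.getD (j - 1) 0) then 1 else 0) :=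
    back_loop hlen hdec (n - 1) (by omega) a1 ha1len k
  -- rewrite the propagated sum fiberwise
  have hf0 : (fun j => if j = 0 then 0 else
      (if k ∈ chain pi (pi.getD (j - 1) 0) then 1 else 0)) 0 = 0 := by simp
  have h2' : a2.getD k 0 = a1.getD k 0 +
      ((List.range n).map (fun i => (fun j => if j = 0 then 0 else
        (if k ∈ chain pi (pi.getD (j - 1) 0) then 1 else 0)) (pi.getD i 0))).sum := by
    rw [h2]
    congr 1
    have hfib := sum_fiber (fun i => pi.getD i 0)
      (fun j => if j = 0 then 0 else (if k ∈ chain pi (pi.getD (j - 1) 0) then 1 else 0))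
      (n - 1) hf0 (List.range n)
      (by intro x hx; show pi.getD x 0 ≤ n - 1;
          have := hpile x (List.mem_range.mp hx); have := List.mem_range.mp hx; omega)
    simp only [] at hfib
    rw [← hfib]
    apply Finset.sum_congr rfl
    intro j hj
    have hj1 : 1 ≤ j := (Finset.mem_Icc.mp hj).1
    rw [h1 j]
    congr 1
    rw [if_neg (show ¬ j = 0 by omega)]
  -- pointwise chain decomposition
  have hpoint : ∀ m, m ≤ n → (if k ∈ chain pi m then (1:Nat) else 0)
      = (if m = k then 1 else 0) + (if m = 0 then 0 else
        (if k ∈ chain pi (pi.getD (m - 1) 0) then 1 else 0)) := by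
    intro m hm
    by_cases hm0 : m = 0
    · subst hm0
      rw [chain_zero, if_pos rfl, Nat.add_zero]
      by_cases hk0 : k = 0
      · subst hk0; simp
      · rw [if_neg (show k ∉ [0] by simp [hk0]), if_neg (show ¬ (0:Nat) = k from fun h => hk0 h.symm)]
    · rw [chain_cons hdec (Nat.pos_of_ne_zero hm0), if_neg hm0]
      by_cases hkm : k = m
      · have hnm : k ∉ chain pi (pi.getD (m - 1) 0) := by
          intro hmem
          have h1 := chain_le hdec _ k hmem
          have h2 := hdec m (Nat.pos_of_ne_zero hm0)
          omega
        rw [if_pos (show k ∈ m :: chain pi (pi.getD (m - 1) 0) from by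
              rw [hkm]; exact List.mem_cons_self ..),
            if_pos (show m = k from hkm.symm), if_neg hnm]
      · rw [if_neg (show ¬ m = k from fun h => hkm h.symm), Nat.zero_add]
        by_cases hmem : k ∈ chain pi (pi.getD (m - 1) 0)
        · rw [if_pos (show k ∈ m :: chain pi (pi.getD (m - 1) 0) from
              List.mem_cons_of_mem _ hmem), if_pos hmem]
        · rw [if_neg (show k ∉ m :: chain pi (pi.getD (m - 1) 0) from by
              intro h
              cases List.mem_cons.mp h with
              | inl h => exact hkm h
              | inr h => exact hmem h), if_neg hmem]
  -- the value after propagation counts chain memberships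
  have hA2 : a2.getD k 0
      = (List.range n).countP (fun i => decide (k ∈ chain pi (pi.getD i 0))) := by
    rw [h2', h1 k, sum_map_range, countP_range_eq_sum, countP_range_eq_sum,
      ← Finset.sum_add_distrib]
    apply Finset.sum_congr rfl
    intro i hi
    have hin : i < n := Finset.mem_range.mp hi
    have hml : pi.getD i 0 ≤ n := by have := hpile i hin; omega
    have := hpoint (pi.getD i 0) hml
    simp only [decide_eq_true_eq]
    rw [this]
  -- final +1 pass
  have h3 : ((List.range (n + 1)).foldl (fun a i => a.set i (a.getD i 0 + 1)) a2).getD k 0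
      = a2.getD k 0 + 1 := by
    have ha2len : a2.length = n + 1 := by
      rw [ha2, foldl_set_length
        (fun a i => a.getD (pi.getD (i - 1) 0) 0 + a.getD i 0) (fun i => pi.getD (i - 1) 0)]
      exact ha1len
    rw [foldl_bucket (fun i => i) _ _
      (by intro x hx; show x < a2.length; rw [ha2len]; exact List.mem_range.mp hx) k]
    congr 1
    have hpt : ∀ x ∈ List.range (n + 1), (decide (x = k)) = (x == k) := by
      intro x _; by_cases h : x = k <;> simp [h]
    rw [List.countP_congr (fun x hx => by rw [hpt x hx])]
    rw [countP_eq_range, if_pos (by omega)]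
  rw [h3, hA2]
  -- B side: reindex and split off the occurrence of the prefix at position 0
  have hBlink : (List.range (n + 1 - k)).countP (fun i => (l.drop i).take k == l.take k)
      = (List.range (n + 1)).countP (fun e => decide (k ≤ e) && bordB l e k) := by
    have hpt : ∀ i ∈ List.range (n + 1 - k),
        ((l.drop i).take k == l.take k) = bordB l (i + k) k := by
      intro i hi
      have hik : i + k ≤ n := by have := List.mem_range.mp hi; omega
      have hiff := slice_iff_bord l k i hik
      by_cases hb : Bord l (i + k) k
      · rw [(bordB_iff l (i + k) k).mpr hb, beq_iff_eq.mpr (hiff.mpr hb)]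
      · have h1 : ¬ ((l.drop i).take k = l.take k) := fun h => hb (hiff.mp h)
        rw [Bool.eq_iff_iff]
        simp [beq_iff_eq, bordB_iff, h1, hb]
    rw [List.countP_congr (fun x hx => by rw [hpt x hx])]
    rw [countP_shift (fun e => bordB l e k) k (n + 1 - k)]
    have hnk : k + (n + 1 - k) = n + 1 := by omega
    rw [hnk]
  have hsplit : (List.range (n + 1)).countP (fun e => decide (k ≤ e) && bordB l e k)
      = (List.range (n + 1)).countP (fun e => decide (k < e) && bordB l e k) + 1 := by
    have hpt : ∀ e ∈ List.range (n + 1),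
        (decide (k ≤ e) && bordB l e k) = ((decide (k < e) && bordB l e k) || (e == k)) := by
      intro e _
      by_cases hek : e = k
      · subst hek
        have hbs : bordB l e e = true := (bordB_iff l e e).mpr (bord_self hk)
        simp [hbs]
      · rw [Bool.eq_iff_iff]
        simp only [Bool.and_eq_true, Bool.or_eq_true, decide_eq_true_eq, beq_iff_eq]
        constructor
        · rintro ⟨h1, h2⟩; exact Or.inl ⟨by omega, h2⟩
        · rintro (⟨h1, h2⟩ | h1)
          · exact ⟨by omega, h2⟩
          · exact absurd h1 hek
    rw [List.countP_congr (fun x hx => by rw [hpt x hx])]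
    rw [countP_or_disjoint _ _ _ (by
      intro x hx hand
      obtain ⟨h1, h2⟩ := hand
      rw [Bool.and_eq_true, decide_eq_true_eq] at h1
      rw [beq_iff_eq] at h2
      omega)]
    rw [countP_eq_range, if_pos (by omega)]
  -- A side: reindex the chain counts to prefix-end positions e = i+1
  have hAlink : (List.range n).countP (fun i => decide (k ∈ chain pi (pi.getD i 0)))
      = (List.range (n + 1)).countP (fun e => decide (k < e) && bordB l e k) := by
    have hpt : ∀ i ∈ List.range n,
        (decide (k ∈ chain pi (pi.getD i 0)))
          = ((fun e => decide (k < e) && bordB l e k) (i + 1)) := by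
      intro i hi
      have hin : i < n := List.mem_range.mp hi
      have hiff : k ∈ chain pi (pi.getD ((i + 1) - 1) 0) ↔ (k < i + 1 ∧ Bord l (i + 1) k) :=
        chain_iff_bord hpi hdec (by omega) (by omega) k
      simp only [Nat.add_sub_cancel] at hiff
      rw [Bool.eq_iff_iff]
      simp only [Bool.and_eq_true, decide_eq_true_eq, bordB_iff]
      exact hiff
    rw [List.countP_congr (fun x hx => by rw [hpt x hx])]
    rw [countP_shift (fun e => decide (k < e) && bordB l e k) 1 n]
    have h1n : 1 + n = n + 1 := by omega
    rw [h1n]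
    have hpt2 : ∀ e ∈ List.range (n + 1),
        (decide (1 ≤ e) && (decide (k < e) && bordB l e k))
          = (decide (k < e) && bordB l e k) := by
      intro e _
      cases e with
      | zero => simp
      | succ e => simp
    rw [List.countP_congr (fun x hx => by rw [hpt2 x hx])]
  rw [hAlink, hBlink, hsplit]

lemma A_length (l : List Char) :
    ((List.range (l.length + 1)).foldl (fun a i => a.set i (a.getD i 0 + 1))
      (((List.range' 1 (l.length - 1)).reverse).foldl
        (fun a i => a.set ((prefixFunction l).getD (i - 1) 0)
          (a.getD ((prefixFunction l).getD (i - 1) 0) 0 + a.getD i 0))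
        ((List.range l.length).foldl
          (fun a i => a.set ((prefixFunction l).getD i 0)
            (a.getD ((prefixFunction l).getD i 0) 0 + 1))
          (List.replicate (l.length + 1) 0)))).length = l.length + 1 := by
  rw [foldl_set_length (fun a i => a.getD i 0 + 1) (fun i => i)]
  rw [foldl_set_length
    (fun a i => a.getD ((prefixFunction l).getD (i - 1) 0) 0 + a.getD i 0)
    (fun i => (prefixFunction l).getD (i - 1) 0)]
  rw [foldl_set_length
    (fun a i => a.getD ((prefixFunction l).getD i 0) 0 + 1)
    (fun i => (prefixFunction l).getD i 0)]
  simp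

-- ===== VERDICT (by name: the statement is the Claim_ definition above) =====
theorem numOccurencesPrefix_spec : Claim_equal_numOccurencesPrefix := by
  intro s _
  show numOccurencesPrefix s = numOccurencesPrefix_alt s
  unfold numOccurencesPrefix numOccurencesPrefix_alt
  set l := s.toList with hl
  apply List.ext_getElem
  · rw [List.length_map, List.length_map, List.length_range, A_length]
  · intro k h1 h2
    rw [List.getElem_map, List.getElem_map, List.getElem_range]
    have hkn : k ≤ l.length := by
      rw [List.length_map, A_length] at h1
      omega
    congr 1
    rw [← List.getD_eq_getElem _ 0 (by rw [A_length]; omega)]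
    exact A_entry l k hkn
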